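-- pv_equiv track=rewrite | github.com/matiasinfo/practica | ejer8-practica2.py | cumple
-- ===== SOURCE A (Python) =====
-- def cumple(palabra,letras):
--     ok = True
--     cant = 0
--     while ok and cant < len(palabra):
--         if not palabra[cant] in letras:
--             ok = False
--         cant += 1
--     return ok
-- ===== SOURCE B (Python) =====
-- def cumple(palabra, letras):
--     # Erasure algorithm: delete all occurrences of each allowed letter
--     # from palabra; palabra complies iff nothing remains.
--     rest = palabra
--     for ch in letras:
--         rest = rest.replace(ch, "")
--     return rest == ""
-- ===== Notes on version B (the rewrite author's own statement) =====
-- stated objective: alternative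
-- what changed: Replaces A's flag-and-counter membership loop with an erasure algorithm: every occurrence of each character of letras is deleted from palabra via str.replace and the result is compared with the empty string; no per-character membership test or early-exit flag remains.
import Mathlib
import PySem

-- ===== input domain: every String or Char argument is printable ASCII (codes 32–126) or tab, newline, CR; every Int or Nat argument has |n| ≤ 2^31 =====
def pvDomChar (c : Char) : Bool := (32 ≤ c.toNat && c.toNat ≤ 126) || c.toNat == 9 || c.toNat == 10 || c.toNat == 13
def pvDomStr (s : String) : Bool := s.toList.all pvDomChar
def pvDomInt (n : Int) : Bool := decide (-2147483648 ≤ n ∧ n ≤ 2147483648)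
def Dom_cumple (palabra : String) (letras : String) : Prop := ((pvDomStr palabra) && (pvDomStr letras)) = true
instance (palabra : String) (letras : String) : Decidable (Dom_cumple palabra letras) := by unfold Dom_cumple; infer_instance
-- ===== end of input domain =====

-- B replaces A's flag-and-counter membership loop with an erasure algorithm: delete every
-- occurrence of each character of letras from palabra and test whether nothing remains
-- (same return values; no speed claim).

-- ===== PORT A =====
-- while ok and cant < len(palabra): if not palabra[cant] in letras: ok = False; cant += 1
def cumpleLoop (p l : List Char) (ok : Bool) (cant : Nat) : Bool :=
  if _h : ok = true ∧ cant < p.length then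
    cumpleLoop p l (if ¬ (l.contains (p.getD cant ' ')) then false else ok) (cant + 1)
  else ok
termination_by p.length - cant
decreasing_by omega

def cumple (palabra : String) (letras : String) : Bool :=
  cumpleLoop palabra.toList letras.toList true 0

-- ===== PORT B =====
-- rest = palabra; for ch in letras: rest = rest.replace(ch, ""); return rest == ""
def cumple_alt (palabra : String) (letras : String) : Bool :=
  let rest := letras.toList.foldl
    (fun rest ch => PySem.Str.replace rest (String.ofList [ch]) "") palabra
  rest == ""

-- ===== PRECONDITION & SPEC =====
def Spec_cumple (palabra : String) (letras : String) (out : Bool) : Prop := out = cumple_alt palabra letras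
instance (palabra : String) (letras : String) (out : Bool) : Decidable (Spec_cumple palabra letras out) := by unfold Spec_cumple; infer_instance

-- ===== CLAIM =====
def Claim_equal_cumple : Prop := ∀ (palabra : String) (letras : String), Dom_cumple palabra letras → Spec_cumple palabra letras (cumple palabra letras)

-- ===== LEMMAS AND PROOFS =====

-- A's loop computes "every character from position cant on is in letras" (short-circuiting on ok)
theorem cumpleLoop_eq (p l : List Char) (ok : Bool) (cant : Nat) :
    cumpleLoop p l ok cant = (ok && (p.drop cant).all (fun c => l.contains c)) := by
  by_cases hok : ok = true
  · subst hok
    by_cases h : cant < p.length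
    · rw [cumpleLoop]
      have hdrop : p.drop cant = p[cant] :: p.drop (cant + 1) :=
        List.drop_eq_getElem_cons h
      have hget : p.getD cant ' ' = p[cant] := List.getD_eq_getElem p ' ' h
      rw [dif_pos (And.intro rfl h), hdrop, hget]
      by_cases hc : l.contains p[cant] = true
      · rw [if_neg (not_not_intro hc), cumpleLoop_eq p l true (cant + 1),
            List.all_cons, hc]
        simp
      · have hc' : l.contains p[cant] = false := by simpa using hc
        rw [if_pos hc, cumpleLoop_eq p l false (cant + 1), List.all_cons, hc']
        simp
    · rw [cumpleLoop]
      rw [dif_neg (by omega)]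
      simp [List.drop_eq_nil_of_le (by omega : p.length ≤ cant)]
  · simp only [Bool.not_eq_true] at hok; subst hok
    rw [cumpleLoop]; simp
termination_by p.length - cant
decreasing_by all_goals omega

-- replace.go with a one-character pattern and empty replacement is 'filter out that character'
theorem replace_go_single (a : Char) (fuel : Nat) :
    ∀ (l acc : List Char), l.length ≤ fuel →
      PySem.Chars.replace.go [a] [] fuel l acc
        = acc.reverse ++ l.filter (fun c => !(c == a)) := by
  induction fuel with
  | zero =>
    intro l acc h
    have : l = [] := List.eq_nil_of_length_eq_zero (by omega)
    subst this
    simp [PySem.Chars.replace.go]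
  | succ n ih =>
    intro l acc h
    cases l with
    | nil => simp [PySem.Chars.replace.go]
    | cons c t =>
      simp only [PySem.Chars.replace.go]
      by_cases hc : c = a
      · subst hc
        have hpre : List.isPrefixOf [c] (c :: t) = true := by
          simp [List.isPrefixOf]
        rw [if_pos hpre]
        have := ih t acc (by simpa using Nat.le_of_succ_le_succ h)
        simpa [List.filter] using this
      · have hpre : List.isPrefixOf [a] (c :: t) = false := by
          simp only [List.isPrefixOf, Bool.and_eq_false_iff, beq_eq_false_iff_ne, ne_eq]
          exact Or.inl (fun h' => hc h'.symm)
        rw [if_neg (by simp [hpre])]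
        have := ih t (c :: acc) (by simpa using Nat.le_of_succ_le_succ h)
        rw [this]
        have hca : (c == a) = false := by simp [hc]
        simp [List.filter, hca]

theorem replace_single (s : List Char) (a : Char) :
    PySem.Chars.replace s [a] [] = s.filter (fun c => !(c == a)) := by
  rw [PySem.Chars.replace]
  rw [if_neg (by simp)]
  simpa using replace_go_single a s.length s [] le_rfl

-- folding the one-character erasures over ls filters out exactly the characters of ls
theorem foldl_filter_eq (ls : List Char) :
    ∀ (p : List Char),
      ls.foldl (fun r a => r.filter (fun c => !(c == a))) p
        = p.filter (fun c => !(ls.contains c)) := by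
  induction ls with
  | nil => intro p; simp
  | cons a t ih =>
    intro p
    simp only [List.foldl_cons, ih]
    rw [List.filter_filter]
    apply List.filter_congr
    intro c _
    by_cases h : c = a <;> simp [h]

-- the String-level fold in cumple_alt tracks the List Char fold
theorem fold_toList (ls : List Char) :
    ∀ (s : String),
      (ls.foldl (fun rest ch => PySem.Str.replace rest (String.ofList [ch]) "") s).toList
        = ls.foldl (fun r a => r.filter (fun c => !(c == a))) s.toList := by
  induction ls with
  | nil => intro s; simp
  | cons a t ih =>
    intro s
    simp only [List.foldl_cons, ih]
    congr 1
    rw [PySem.Str.toList_replace]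
    have h1 : (String.ofList [a]).toList = [a] := by simp
    have h2 : ("" : String).toList = [] := by simp
    rw [h1, h2]
    exact replace_single s.toList a

-- ===== VERDICT =====
theorem cumple_spec : Claim_equal_cumple := by
  unfold Claim_equal_cumple
  intro palabra letras _
  unfold Spec_cumple cumple cumple_alt
  rw [cumpleLoop_eq]
  have hB : ((letras.toList.foldl
      (fun rest ch => PySem.Str.replace rest (String.ofList [ch]) "") palabra) == "")
      = ((palabra.toList.filter (fun c => !(letras.toList.contains c))).isEmpty) := by
    rw [Bool.eq_iff_iff, beq_iff_eq, List.isEmpty_iff, ← String.toList_inj,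
        fold_toList, foldl_filter_eq]
    rfl
  rw [hB, Bool.eq_iff_iff]
  simp [List.all_eq_true, List.isEmpty_iff, List.filter_eq_nil_iff]
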